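-- pv_equiv track=rewrite | github.com/3LENDERMAN/Python_projects | 06/fixpoint.py | fixpoint
-- ===== SOURCE A (Python) =====
-- def f(a: int) -> set[int]:
--     return {a, a // 2, a // 7}
--
-- def fixpoint(starting_set: set[int]) -> int:
--     final_set: set[int] = starting_set.copy()
--     count: int = 0
--
--     while True:
--         new_set = set()
--         for num in final_set:
--             new_set.update(f(num))
--
--         if new_set == final_set:
--             break
--
--         final_set = new_set
--         count += 1
--
--     return count
-- ===== SOURCE B (Python) =====
-- def fixpoint(starting_set: set[int]) -> int:
--     # BFS: each level, only the previous level's NEW elements can generate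
--     # anything unseen (every element maps into itself, so old elements add nothing new).
--     seen = set(starting_set)
--     frontier = set(starting_set)
--     count = 0
--     while True:
--         nxt = set()
--         for a in frontier:
--             nxt.add(a // 2)
--             nxt.add(a // 7)
--         nxt -= seen
--         if not nxt:
--             return count
--         seen |= nxt
--         frontier = nxt
--         count += 1
-- ===== Notes on version B (the rewrite author's own statement) =====
-- stated objective: faster
-- what changed: Instead of re-applying f to the whole accumulated set every round (and rebuilding it from scratch), B does a BFS that expands only the previous round's new elements (since f(a) contains a, old elements generate nothing new), counting rounds that produce new elements.
import Mathlib
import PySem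

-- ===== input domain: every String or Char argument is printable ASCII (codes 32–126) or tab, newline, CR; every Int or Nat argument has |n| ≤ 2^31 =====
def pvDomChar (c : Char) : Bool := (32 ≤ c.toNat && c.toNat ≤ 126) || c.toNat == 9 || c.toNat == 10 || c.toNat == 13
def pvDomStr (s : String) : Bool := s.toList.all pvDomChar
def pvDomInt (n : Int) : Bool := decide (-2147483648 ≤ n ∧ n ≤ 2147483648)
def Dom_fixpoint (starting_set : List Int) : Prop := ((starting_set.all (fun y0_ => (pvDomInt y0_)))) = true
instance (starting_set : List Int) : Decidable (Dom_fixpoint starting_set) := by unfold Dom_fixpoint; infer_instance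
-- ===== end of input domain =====

-- B replaces "re-apply f to the whole accumulated set each round" by a BFS that expands
-- only the previous round's new elements (f(a) contains a, so old elements add nothing new);
-- measured faster on large inputs (objective: faster).


-- ===== PORT A =====
-- helper f(a) = {a, a // 2, a // 7}
def pvF (a : Int) : PySem.Set Int :=
  PySem.Set.ofList [a, PySem.Int.floordiv a 2, PySem.Int.floordiv a 7]

-- the 'while True' loop of A; fuel only makes the recursion total (never reached in Python's runs)
def pvLoopA (fuel : Nat) (finalSet : PySem.Set Int) (count : Int) : Int :=
  match fuel with
  | 0 => count
  | fuel + 1 =>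
    let newSet := finalSet.foldl (fun ns num => PySem.Set.update ns (pvF num)) PySem.Set.empty
    if PySem.Set.equal newSet finalSet then count
    else pvLoopA fuel newSet (count + 1)

def fixpoint (starting_set : List Int) : Int :=
  pvLoopA 1000000000 (PySem.Set.ofList starting_set) 0

-- ===== PORT B =====
-- the 'while True' BFS loop of B; same fuel guard for totality
def pvLoopB (fuel : Nat) (seen frontier : PySem.Set Int) (count : Int) : Int :=
  match fuel with
  | 0 => count
  | fuel + 1 =>
    let gen := frontier.foldl
      (fun s a => PySem.Set.add (PySem.Set.add s (PySem.Int.floordiv a 2)) (PySem.Int.floordiv a 7))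
      PySem.Set.empty
    let nxt := PySem.Set.diff gen seen
    if nxt.isEmpty then count
    else pvLoopB fuel (PySem.Set.union seen nxt) nxt (count + 1)

def fixpoint_alt (starting_set : List Int) : Int :=
  pvLoopB 1000000000 (PySem.Set.ofList starting_set) (PySem.Set.ofList starting_set) 0

-- ===== PRECONDITION & SPEC =====
def Spec_fixpoint (starting_set : List Int) (out : Int) : Prop := out = fixpoint_alt starting_set
instance (starting_set : List Int) (out : Int) : Decidable (Spec_fixpoint starting_set out) := by unfold Spec_fixpoint; infer_instance

-- ===== CLAIM (what is proved, stated in full; the proofs are below) =====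
def Claim_equal_fixpoint : Prop := ∀ (starting_set : List Int), Dom_fixpoint starting_set → Spec_fixpoint starting_set (fixpoint starting_set)

-- ===== LEMMAS AND PROOFS =====

-- membership in A's fold (new_set after the inner for-loop)
theorem mem_foldA (S : List Int) (init : PySem.Set Int) (y : Int) :
    y ∈ S.foldl (fun ns num => PySem.Set.update ns (pvF num)) init ↔
      y ∈ init ∨ ∃ a ∈ S, y ∈ pvF a := by
  induction S generalizing init with
  | nil => simp
  | cons a S ih =>
    simp only [List.foldl_cons, ih, PySem.Set.mem_update, List.mem_cons]
    constructor
    · rintro (⟨h | h⟩ | ⟨b, hb, h⟩)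
      · exact Or.inl h
      · exact Or.inr ⟨a, Or.inl rfl, h⟩
      · exact Or.inr ⟨b, Or.inr hb, h⟩
    · rintro (h | ⟨b, (rfl | hb), h⟩)
      · exact Or.inl (Or.inl h)
      · exact Or.inl (Or.inr h)
      · exact Or.inr ⟨b, hb, h⟩

theorem nodup_foldA (S : List Int) (init : PySem.Set Int) (h : init.Nodup) :
    (S.foldl (fun ns num => PySem.Set.update ns (pvF num)) init).Nodup := by
  induction S generalizing init with
  | nil => exact h
  | cons a S ih => exact ih _ (PySem.Set.nodup_update _ _ h)

theorem mem_pvF (a y : Int) :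
    y ∈ pvF a ↔ y = a ∨ y = PySem.Int.floordiv a 2 ∨ y = PySem.Int.floordiv a 7 := by
  simp [pvF, PySem.Set.mem_ofList]

-- membership in B's fold (nxt before subtracting seen)
theorem mem_foldB (F : List Int) (init : PySem.Set Int) (y : Int) :
    y ∈ F.foldl
        (fun s a => PySem.Set.add (PySem.Set.add s (PySem.Int.floordiv a 2)) (PySem.Int.floordiv a 7))
        init ↔
      y ∈ init ∨ ∃ a ∈ F, y = PySem.Int.floordiv a 2 ∨ y = PySem.Int.floordiv a 7 := by
  induction F generalizing init with
  | nil => simp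
  | cons a F ih =>
    simp only [List.foldl_cons, ih, PySem.Set.mem_add, List.mem_cons]
    constructor
    · rintro (((h | h) | h) | ⟨b, hb, h⟩)
      · exact Or.inl h
      · exact Or.inr ⟨a, Or.inl rfl, Or.inl h⟩
      · exact Or.inr ⟨a, Or.inl rfl, Or.inr h⟩
      · exact Or.inr ⟨b, Or.inr hb, h⟩
    · rintro (h | ⟨b, (rfl | hb), h⟩)
      · exact Or.inl (Or.inl (Or.inl h))
      · rcases h with h | h
        · exact Or.inl (Or.inl (Or.inr h))
        · exact Or.inl (Or.inr h)
      · exact Or.inr ⟨b, hb, h⟩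

-- the bisimulation invariant between A's state and B's state
def pvInv (S seen frontier : PySem.Set Int) : Prop :=
  S.Nodup ∧ seen.Nodup ∧
  (∀ x, x ∈ S ↔ x ∈ seen) ∧
  (∀ x ∈ frontier, x ∈ S) ∧
  (∀ a ∈ S, a ∉ frontier →
    PySem.Int.floordiv a 2 ∈ S ∧ PySem.Int.floordiv a 7 ∈ S)

theorem pvLoop_eq (fuel : Nat) (S seen frontier : PySem.Set Int) (c : Int)
    (h : pvInv S seen frontier) :
    pvLoopA fuel S c = pvLoopB fuel seen frontier c := by
  induction fuel generalizing S seen frontier c with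
  | zero => rfl
  | succ fuel ih =>
    obtain ⟨hSnd, hseennd, hmem, hfsub, hclos⟩ := h
    simp only [pvLoopA, pvLoopB]
    set newSet := S.foldl (fun ns num => PySem.Set.update ns (pvF num)) PySem.Set.empty with hnewSet
    set gen := frontier.foldl
      (fun s a => PySem.Set.add (PySem.Set.add s (PySem.Int.floordiv a 2)) (PySem.Int.floordiv a 7))
      PySem.Set.empty with hgen
    set nxt := PySem.Set.diff gen seen with hnxt
    have hnewSet_mem : ∀ y, y ∈ newSet ↔ y ∈ S ∨ ∃ a ∈ S,
        y = PySem.Int.floordiv a 2 ∨ y = PySem.Int.floordiv a 7 := by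
      intro y
      rw [hnewSet, mem_foldA]
      simp only [PySem.Set.empty, List.not_mem_nil, false_or, mem_pvF]
      constructor
      · rintro ⟨a, ha, (rfl | h)⟩
        · exact Or.inl ha
        · exact Or.inr ⟨a, ha, h⟩
      · rintro (h | ⟨a, ha, h⟩)
        · exact ⟨y, h, Or.inl rfl⟩
        · exact ⟨a, ha, Or.inr h⟩
    have hnxt_mem : ∀ y, y ∈ nxt ↔
        (∃ a ∈ frontier, y = PySem.Int.floordiv a 2 ∨ y = PySem.Int.floordiv a 7) ∧ y ∉ seen := by
      intro y
      rw [hnxt, PySem.Set.mem_diff, hgen, mem_foldB]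
      simp [PySem.Set.empty]
    -- key: the two stop conditions coincide
    have hstop : PySem.Set.equal newSet S = true ↔ nxt.isEmpty = true := by
      constructor
      · intro h
        rw [PySem.Set.equal_iff] at h
        rw [List.isEmpty_iff, List.eq_nil_iff_forall_not_mem]
        intro y hy
        rw [hnxt_mem] at hy
        obtain ⟨⟨a, ha, hya⟩, hns⟩ := hy
        have haS : a ∈ S := hfsub a ha
        have : y ∈ newSet := (hnewSet_mem y).2 (Or.inr ⟨a, haS, hya⟩)
        exact hns ((hmem y).1 ((h y).1 this))
      · intro h
        rw [List.isEmpty_iff, List.eq_nil_iff_forall_not_mem] at h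
        rw [PySem.Set.equal_iff]
        intro y
        rw [hnewSet_mem]
        constructor
        · rintro (hy | ⟨a, ha, hya⟩)
          · exact hy
          · by_cases haf : a ∈ frontier
            · by_contra hyS
              exact h y ((hnxt_mem y).2 ⟨⟨a, haf, hya⟩, fun hs => hyS ((hmem y).2 hs)⟩)
            · rcases hya with rfl | rfl
              · exact (hclos a ha haf).1
              · exact (hclos a ha haf).2
        · exact Or.inl
    by_cases hs : nxt.isEmpty = true
    · rw [if_pos (hstop.2 hs), if_pos hs]
    · rw [if_neg (fun hq => hs (hstop.1 hq)), if_neg hs]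
      have hmemN : ∀ x, x ∈ newSet ↔ x ∈ PySem.Set.union seen nxt := by
        intro x
        rw [hnewSet_mem, PySem.Set.mem_union, hnxt_mem]
        constructor
        · rintro (hx | ⟨a, ha, hxa⟩)
          · exact Or.inl ((hmem x).1 hx)
          · by_cases hxs : x ∈ seen
            · exact Or.inl hxs
            · by_cases haf : a ∈ frontier
              · exact Or.inr ⟨⟨a, haf, hxa⟩, hxs⟩
              · exfalso
                apply hxs
                rcases hxa with rfl | rfl
                · exact (hmem _).1 (hclos a ha haf).1
                · exact (hmem _).1 (hclos a ha haf).2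
        · rintro (hx | ⟨⟨a, ha, hxa⟩, -⟩)
          · exact Or.inl ((hmem x).2 hx)
          · exact Or.inr ⟨a, hfsub a ha, hxa⟩
      apply ih
      refine ⟨nodup_foldA _ _ (by simp [PySem.Set.empty]),
              PySem.Set.nodup_union _ _ hseennd, hmemN, ?_, ?_⟩
      · intro x hx
        rw [hnxt_mem] at hx
        obtain ⟨⟨a, ha, hxa⟩, -⟩ := hx
        exact (hnewSet_mem x).2 (Or.inr ⟨a, hfsub a ha, hxa⟩)
      · intro a haN hanxt
        have haS : a ∈ S := by
          rcases (PySem.Set.mem_union _ _ _).1 ((hmemN a).1 haN) with h | h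
          · exact (hmem a).2 h
          · exact absurd h hanxt
        exact ⟨(hnewSet_mem _).2 (Or.inr ⟨a, haS, Or.inl rfl⟩),
               (hnewSet_mem _).2 (Or.inr ⟨a, haS, Or.inr rfl⟩)⟩

theorem fixpoint_spec : Claim_equal_fixpoint := by
  intro xs _
  unfold Spec_fixpoint fixpoint fixpoint_alt
  apply pvLoop_eq
  exact ⟨PySem.Set.nodup_ofList _, PySem.Set.nodup_ofList _, fun x => Iff.rfl,
         fun x hx => hx, fun a ha haf => absurd ha haf⟩
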